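-- pv_equiv track=rewrite | github.com/jryszardnoszczyk/gofreddy | harness/worktree.py | detect_backend_changes
-- ===== SOURCE A (Python) =====
-- def detect_backend_changes(
--     before: dict[str, str],
--     after: dict[str, str],
-- ) -> list[str]:
--     """Return file paths that differ between two backend snapshots.
--
--     Covers modified, added, and deleted files.
--     """
--     changed: list[str] = []
--     all_keys = sorted(set(before) | set(after))
--     for key in all_keys:
--         if key not in before:
--             # Added
--             changed.append(key)
--         elif key not in after:
--             # Deleted
--             changed.append(key)
--         elif before[key] != after[key]:
--             # Modified
--             changed.append(key)
--     return changed
-- ===== SOURCE B (Python) =====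
-- def detect_backend_changes(
--     before: dict[str, str],
--     after: dict[str, str],
-- ) -> list[str]:
--     """Return file paths that differ between two backend snapshots.
--
--     Sort both item lists by key, then merge them with two pointers,
--     emitting added/deleted/modified keys directly in sorted order
--     (no union set and no final sort of the result).
--     """
--     bi = sorted(before.items(), key=lambda kv: kv[0])
--     ai = sorted(after.items(), key=lambda kv: kv[0])
--     out: list[str] = []
--     i = j = 0
--     while i < len(bi) and j < len(ai):
--         bk, bv = bi[i]
--         ak, av = ai[j]
--         if bk < ak:
--             out.append(bk)          # only in before: deleted
--             i += 1
--         elif ak < bk: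
--             out.append(ak)          # only in after: added
--             j += 1
--         else:
--             if bv != av:
--                 out.append(bk)      # in both, value changed: modified
--             i += 1
--             j += 1
--     while i < len(bi):
--         out.append(bi[i][0])
--         i += 1
--     while j < len(ai):
--         out.append(ai[j][0])
--         j += 1
--     return out
-- ===== Notes on version B (the rewrite author's own statement) =====
-- stated objective: alternative
-- what changed: Replaced the sort-the-union-then-branch-per-key loop by a two-pointer merge of the two key-sorted item lists that emits added/deleted/modified keys directly in sorted order, with no union set and no sort of the result.
import Mathlib
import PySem

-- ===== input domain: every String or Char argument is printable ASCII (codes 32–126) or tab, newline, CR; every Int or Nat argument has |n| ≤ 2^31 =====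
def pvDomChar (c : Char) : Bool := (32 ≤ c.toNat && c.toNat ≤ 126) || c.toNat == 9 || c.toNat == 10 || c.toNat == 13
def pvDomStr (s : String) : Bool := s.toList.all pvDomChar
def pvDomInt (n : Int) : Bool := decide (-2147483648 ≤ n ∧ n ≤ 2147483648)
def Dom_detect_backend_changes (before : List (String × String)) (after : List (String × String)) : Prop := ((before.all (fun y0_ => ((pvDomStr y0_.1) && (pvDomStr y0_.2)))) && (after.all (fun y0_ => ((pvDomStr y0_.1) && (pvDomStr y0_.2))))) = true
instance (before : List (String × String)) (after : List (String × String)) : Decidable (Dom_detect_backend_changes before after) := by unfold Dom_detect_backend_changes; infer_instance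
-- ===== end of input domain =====

-- B replaces A's sort-the-key-union-then-branch-per-key loop by a two-pointer merge of the two key-sorted item lists — objective: alternative (same cost, no union set, no final sort).

-- ===== PORT A =====
def detect_backend_changes (before : List (String × String)) (after : List (String × String)) : List String :=
  let b := PySem.Dict.ofList before
  let a := PySem.Dict.ofList after
  let all_keys := PySem.List.sorted
      (PySem.Set.union (PySem.Set.ofList b.keys) (PySem.Set.ofList a.keys)) (fun x => x) false
  all_keys.foldl (fun changed key =>
    if ¬ (b.contains key = true) then changed ++ [key]
    else if ¬ (a.contains key = true) then changed ++ [key]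
    else if b.getD key "" ≠ a.getD key "" then changed ++ [key]
    else changed) []

-- ===== PORT B =====
-- the two-pointer merge loop of Source B, as the structural recursion on the two remaining suffixes
def mergeChanges : List (String × String) → List (String × String) → List String
  | [], ys => ys.map Prod.fst
  | x :: xs, [] => (x :: xs).map Prod.fst
  | (bk, bv) :: bs, (ak, av) :: as' =>
    if bk < ak then bk :: mergeChanges bs ((ak, av) :: as')
    else if ak < bk then ak :: mergeChanges ((bk, bv) :: bs) as'
    else (if bv ≠ av then [bk] else []) ++ mergeChanges bs as'
termination_by xs ys => xs.length + ys.length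

def detect_backend_changes_alt (before : List (String × String)) (after : List (String × String)) : List String :=
  let bi := PySem.List.sorted (PySem.Dict.ofList before).items (fun kv => kv.1) false
  let ai := PySem.List.sorted (PySem.Dict.ofList after).items (fun kv => kv.1) false
  mergeChanges bi ai

-- ===== PRECONDITION & SPEC =====
def Spec_detect_backend_changes (before : List (String × String)) (after : List (String × String)) (out : List String) : Prop := out = detect_backend_changes_alt before after
instance (before : List (String × String)) (after : List (String × String)) (out : List String) : Decidable (Spec_detect_backend_changes before after out) := by unfold Spec_detect_backend_changes; infer_instance

-- ===== CLAIM =====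
def Claim_equal_detect_backend_changes : Prop := ∀ (before : List (String × String)) (after : List (String × String)), Dom_detect_backend_changes before after → Spec_detect_backend_changes before after (detect_backend_changes before after)

-- ===== LEMMAS AND PROOFS =====

-- every element of the merge output is a key of one of the two inputs
theorem pv_merge_mem_sub (bs as : List (String × String)) (x : String)
    (hx : x ∈ mergeChanges bs as) : x ∈ bs.map Prod.fst ∨ x ∈ as.map Prod.fst := by
  induction bs, as using mergeChanges.induct with
  | case1 ys => rw [mergeChanges] at hx; exact Or.inr hx
  | case2 y ys => rw [mergeChanges] at hx; exact Or.inl hx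
  | case3 bk bv bs ak av as' h ih =>
    rw [mergeChanges, if_pos h] at hx
    rcases List.mem_cons.mp hx with h1 | h1
    · exact Or.inl (by simp [h1])
    · rcases ih h1 with h2 | h2
      · exact Or.inl (by simp at h2 ⊢; tauto)
      · exact Or.inr h2
  | case4 bk bv bs ak av as' h h' ih =>
    rw [mergeChanges, if_neg h, if_pos h'] at hx
    rcases List.mem_cons.mp hx with h1 | h1
    · exact Or.inr (by simp [h1])
    · rcases ih h1 with h2 | h2
      · exact Or.inl h2
      · exact Or.inr (by simp at h2 ⊢; tauto)
  | case5 bk bv bs ak av as' h h' ih =>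
    rw [mergeChanges, if_neg h, if_neg h'] at hx
    rcases List.mem_append.mp hx with h1 | h1
    · split at h1 <;> simp at h1
      exact Or.inl (by simp [h1])
    · rcases ih h1 with h2 | h2
      · exact Or.inl (by simp at h2 ⊢; tauto)
      · exact Or.inr (by simp at h2 ⊢; tauto)

theorem pv_merge_lt_of_lt (bs as : List (String × String)) (c : String)
    (h1 : ∀ q ∈ bs, c < q.1) (h2 : ∀ q ∈ as, c < q.1) :
    ∀ y ∈ mergeChanges bs as, c < y := by
  intro y hy
  rcases pv_merge_mem_sub bs as y hy with h | h <;>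
    · rcases List.mem_map.mp h with ⟨q, hq, rfl⟩
      first | exact h1 q hq | exact h2 q hq

-- the merge of two strictly-key-sorted lists is strictly sorted
theorem pv_merge_pairwise (bs as : List (String × String))
    (hb : bs.Pairwise (fun p q => p.1 < q.1)) (ha : as.Pairwise (fun p q => p.1 < q.1)) :
    (mergeChanges bs as).Pairwise (· < ·) := by
  induction bs, as using mergeChanges.induct with
  | case1 ys => rw [mergeChanges]; exact (List.pairwise_map).mpr ha
  | case2 y ys => rw [mergeChanges]; exact (List.pairwise_map).mpr hb
  | case3 bk bv bs ak av as' h ih =>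
    rw [mergeChanges, if_pos h, List.pairwise_cons]
    rcases List.pairwise_cons.mp hb with ⟨hb1, hb2⟩
    rcases List.pairwise_cons.mp ha with ⟨ha1, ha2⟩
    refine ⟨pv_merge_lt_of_lt _ _ _ (fun q hq => hb1 q hq) ?_, ih hb2 ha⟩
    intro q hq
    rcases List.mem_cons.mp hq with rfl | hq
    · exact h
    · exact lt_trans h (ha1 q hq)
  | case4 bk bv bs ak av as' h h' ih =>
    rw [mergeChanges, if_neg h, if_pos h', List.pairwise_cons]
    rcases List.pairwise_cons.mp hb with ⟨hb1, hb2⟩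
    rcases List.pairwise_cons.mp ha with ⟨ha1, ha2⟩
    refine ⟨pv_merge_lt_of_lt _ _ _ ?_ (fun q hq => ha1 q hq), ih hb ha2⟩
    intro q hq
    rcases List.mem_cons.mp hq with rfl | hq
    · exact h'
    · exact lt_trans h' (hb1 q hq)
  | case5 bk bv bs ak av as' h h' ih =>
    have hk : bk = ak := le_antisymm (not_lt.mp h') (not_lt.mp h)
    rw [mergeChanges, if_neg h, if_neg h']
    rcases List.pairwise_cons.mp hb with ⟨hb1, hb2⟩
    rcases List.pairwise_cons.mp ha with ⟨ha1, ha2⟩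
    have hbound : ∀ y ∈ mergeChanges bs as', bk < y :=
      pv_merge_lt_of_lt _ _ _ (fun q hq => hb1 q hq) (fun q hq => hk ▸ ha1 q hq)
    by_cases hv : bv = av
    · simp only [hv, ne_eq, not_true_eq_false, if_false, List.nil_append]
      exact ih hb2 ha2
    · simp only [ne_eq, hv, not_false_eq_true, if_true, List.singleton_append,
        List.pairwise_cons]
      exact ⟨hbound, ih hb2 ha2⟩

-- membership characterisation of the merge output
theorem pv_merge_mem (bs as : List (String × String)) (x : String)
    (hb : bs.Pairwise (fun p q => p.1 < q.1)) (ha : as.Pairwise (fun p q => p.1 < q.1)) :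
    x ∈ mergeChanges bs as ↔
      (x ∈ bs.map Prod.fst ∧ x ∉ as.map Prod.fst) ∨
      (x ∈ as.map Prod.fst ∧ x ∉ bs.map Prod.fst) ∨
      (∃ v w, (x, v) ∈ bs ∧ (x, w) ∈ as ∧ v ≠ w) := by
  induction bs, as using mergeChanges.induct with
  | case1 ys => rw [mergeChanges]; simp
  | case2 y ys => rw [mergeChanges]; simp
  | case3 bk bv bs ak av as' h ih =>
    rcases List.pairwise_cons.mp hb with ⟨hb1, hb2⟩
    rcases List.pairwise_cons.mp ha with ⟨ha1, ha2⟩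
    have hbkA : bk ∉ ((ak, av) :: as').map Prod.fst := by
      intro hm
      rcases List.mem_map.mp hm with ⟨q, hq, hq1⟩
      rcases List.mem_cons.mp hq with rfl | hq
      · exact absurd hq1 (ne_of_gt h)
      · exact absurd hq1 (ne_of_gt (lt_trans h (ha1 q hq)))
    have hbkB : bk ∉ bs.map Prod.fst := by
      intro hm
      rcases List.mem_map.mp hm with ⟨q, hq, hq1⟩
      exact absurd hq1 (ne_of_gt (hb1 q hq))
    rw [mergeChanges, if_pos h, List.mem_cons, ih hb2 ha]
    constructor
    · rintro (rfl | (⟨h1, h2⟩ | ⟨h1, h2⟩ | ⟨v, w, h1, h2, h3⟩))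
      · exact Or.inl ⟨by simp, hbkA⟩
      · exact Or.inl ⟨by simp [h1], h2⟩
      · refine Or.inr (Or.inl ⟨h1, ?_⟩)
        intro hm
        rcases List.mem_map.mp hm with ⟨q, hq, hq1⟩
        rcases List.mem_cons.mp hq with rfl | hq
        · rw [← show bk = x from hq1] at h1; exact hbkA h1
        · exact h2 (List.mem_map.mpr ⟨q, hq, hq1⟩)
      · exact Or.inr (Or.inr ⟨v, w, List.mem_cons_of_mem _ h1, h2, h3⟩)
    · rintro (⟨h1, h2⟩ | ⟨h1, h2⟩ | ⟨v, w, h1, h2, h3⟩)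
      · rcases List.mem_map.mp h1 with ⟨q, hq, hq1⟩
        rcases List.mem_cons.mp hq with rfl | hq
        · exact Or.inl hq1.symm
        · exact Or.inr (Or.inl ⟨hq1 ▸ List.mem_map.mpr ⟨q, hq, rfl⟩, h2⟩)
      · refine Or.inr (Or.inr (Or.inl ⟨h1, fun hm => h2 ?_⟩))
        rcases List.mem_map.mp hm with ⟨q, hq, hq1⟩
        exact List.mem_map.mpr ⟨q, List.mem_cons_of_mem _ hq, hq1⟩
      · rcases List.mem_cons.mp h1 with heq | h1
        · exact Or.inl (congrArg Prod.fst heq)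
        · exact Or.inr (Or.inr (Or.inr ⟨v, w, h1, h2, h3⟩))
  | case4 bk bv bs ak av as' h h' ih =>
    rcases List.pairwise_cons.mp hb with ⟨hb1, hb2⟩
    rcases List.pairwise_cons.mp ha with ⟨ha1, ha2⟩
    have hakB : ak ∉ ((bk, bv) :: bs).map Prod.fst := by
      intro hm
      rcases List.mem_map.mp hm with ⟨q, hq, hq1⟩
      rcases List.mem_cons.mp hq with rfl | hq
      · exact absurd hq1 (ne_of_gt h')
      · exact absurd hq1 (ne_of_gt (lt_trans h' (hb1 q hq)))
    rw [mergeChanges, if_neg h, if_pos h', List.mem_cons, ih hb ha2]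
    constructor
    · rintro (rfl | (⟨h1, h2⟩ | ⟨h1, h2⟩ | ⟨v, w, h1, h2, h3⟩))
      · exact Or.inr (Or.inl ⟨by simp, hakB⟩)
      · refine Or.inl ⟨h1, ?_⟩
        intro hm
        rcases List.mem_map.mp hm with ⟨q, hq, hq1⟩
        rcases List.mem_cons.mp hq with rfl | hq
        · rw [← show ak = x from hq1] at h1; exact hakB h1
        · exact h2 (List.mem_map.mpr ⟨q, hq, hq1⟩)
      · exact Or.inr (Or.inl ⟨by simp [h1], h2⟩)
      · exact Or.inr (Or.inr ⟨v, w, h1, List.mem_cons_of_mem _ h2, h3⟩)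
    · rintro (⟨h1, h2⟩ | ⟨h1, h2⟩ | ⟨v, w, h1, h2, h3⟩)
      · refine Or.inr (Or.inl ⟨h1, fun hm => h2 ?_⟩)
        rcases List.mem_map.mp hm with ⟨q, hq, hq1⟩
        exact List.mem_map.mpr ⟨q, List.mem_cons_of_mem _ hq, hq1⟩
      · rcases List.mem_map.mp h1 with ⟨q, hq, hq1⟩
        rcases List.mem_cons.mp hq with rfl | hq
        · exact Or.inl hq1.symm
        · exact Or.inr (Or.inr (Or.inl ⟨hq1 ▸ List.mem_map.mpr ⟨q, hq, rfl⟩, h2⟩))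
      · rcases List.mem_cons.mp h2 with heq | h2
        · exact Or.inl (congrArg Prod.fst heq)
        · exact Or.inr (Or.inr (Or.inr ⟨v, w, h1, h2, h3⟩))
  | case5 bk bv bs ak av as' h h' ih =>
    have hk : bk = ak := le_antisymm (not_lt.mp h') (not_lt.mp h)
    rcases List.pairwise_cons.mp hb with ⟨hb1, hb2⟩
    rcases List.pairwise_cons.mp ha with ⟨ha1, ha2⟩
    have hbkB : bk ∉ bs.map Prod.fst := by
      intro hm; rcases List.mem_map.mp hm with ⟨q, hq, hq1⟩
      exact absurd hq1 (ne_of_gt (hb1 q hq))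
    have hakA : ak ∉ as'.map Prod.fst := by
      intro hm; rcases List.mem_map.mp hm with ⟨q, hq, hq1⟩
      exact absurd hq1 (ne_of_gt (ha1 q hq))
    rw [mergeChanges, if_neg h, if_neg h', List.mem_append, ih hb2 ha2]
    constructor
    · rintro (hone | (⟨h1, h2⟩ | ⟨h1, h2⟩ | ⟨v, w, h1, h2, h3⟩))
      · have hx : x = bk ∧ bv ≠ av := by
          by_cases hv : bv = av <;> simp [hv] at hone
          · exact ⟨hone, hv⟩
        refine Or.inr (Or.inr ⟨bv, av, ?_, ?_, hx.2⟩)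
        · rw [hx.1]; exact List.mem_cons_self
        · rw [hx.1, hk]; exact List.mem_cons_self
      · refine Or.inl ⟨List.mem_map.mpr ?_, ?_⟩
        · rcases List.mem_map.mp h1 with ⟨q, hq, hq1⟩
          exact ⟨q, List.mem_cons_of_mem _ hq, hq1⟩
        · intro hm
          rcases List.mem_map.mp hm with ⟨q, hq, hq1⟩
          rcases List.mem_cons.mp hq with rfl | hq
          · rcases List.mem_map.mp h1 with ⟨q', hq', hq1'⟩
            exact absurd (hq1' ▸ hq1 ▸ hk.symm) (ne_of_gt (hb1 q' hq'))
          · exact h2 (List.mem_map.mpr ⟨q, hq, hq1⟩)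
      · refine Or.inr (Or.inl ⟨List.mem_map.mpr ?_, ?_⟩)
        · rcases List.mem_map.mp h1 with ⟨q, hq, hq1⟩
          exact ⟨q, List.mem_cons_of_mem _ hq, hq1⟩
        · intro hm
          rcases List.mem_map.mp hm with ⟨q, hq, hq1⟩
          rcases List.mem_cons.mp hq with rfl | hq
          · rcases List.mem_map.mp h1 with ⟨q', hq', hq1'⟩
            exact absurd (hq1' ▸ hq1 ▸ hk) (ne_of_gt (ha1 q' hq'))
          · exact h2 (List.mem_map.mpr ⟨q, hq, hq1⟩)
      · exact Or.inr (Or.inr ⟨v, w, List.mem_cons_of_mem _ h1, List.mem_cons_of_mem _ h2, h3⟩)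
    · rintro (⟨h1, h2⟩ | ⟨h1, h2⟩ | ⟨v, w, h1, h2, h3⟩)
      · rcases List.mem_map.mp h1 with ⟨q, hq, hq1⟩
        rcases List.mem_cons.mp hq with rfl | hq
        · exact absurd (List.mem_map.mpr ⟨(ak, av), List.mem_cons_self, hq1 ▸ hk.symm⟩) h2
        · refine Or.inr (Or.inl ⟨List.mem_map.mpr ⟨q, hq, hq1⟩, fun hm => h2 ?_⟩)
          rcases List.mem_map.mp hm with ⟨q', hq', hq1'⟩
          exact List.mem_map.mpr ⟨q', List.mem_cons_of_mem _ hq', hq1'⟩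
      · rcases List.mem_map.mp h1 with ⟨q, hq, hq1⟩
        rcases List.mem_cons.mp hq with rfl | hq
        · exact absurd (List.mem_map.mpr ⟨(bk, bv), List.mem_cons_self, hq1 ▸ hk⟩) h2
        · refine Or.inr (Or.inr (Or.inl ⟨List.mem_map.mpr ⟨q, hq, hq1⟩, fun hm => h2 ?_⟩))
          rcases List.mem_map.mp hm with ⟨q', hq', hq1'⟩
          exact List.mem_map.mpr ⟨q', List.mem_cons_of_mem _ hq', hq1'⟩
      · rcases List.mem_cons.mp h1 with heq | h1
        · have hxbk : x = bk := congrArg Prod.fst heq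
          have hvv : v = bv := congrArg Prod.snd heq
          rcases List.mem_cons.mp h2 with heq2 | h2
          · have hwv : w = av := congrArg Prod.snd heq2
            have hne : bv ≠ av := by rw [← hvv, ← hwv]; exact h3
            exact Or.inl (by simp [hxbk, hne])
          · exact absurd (List.mem_map.mpr ⟨(x, w), h2, (show (x, w).1 = ak from hxbk.trans hk)⟩) hakA
        · have hlt : bk < x := hb1 (x, v) h1
          rcases List.mem_cons.mp h2 with heq2 | h2
          · have hxak : x = ak := congrArg Prod.fst heq2
            have : bk < bk := by
              calc bk < x := hlt
                _ = bk := by rw [hxak, ← hk]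
            exact absurd this (lt_irrefl _)
          · exact Or.inr (Or.inr (Or.inr ⟨v, w, h1, h2, h3⟩))

-- a key-nondecreasing list whose keys are distinct is strictly key-increasing
theorem pv_pairwise_lt_of_le_nodup (l : List (String × String))
    (h1 : l.Pairwise (fun p q => p.1 ≤ q.1)) (h2 : (l.map Prod.fst).Nodup) :
    l.Pairwise (fun p q => p.1 < q.1) := by
  induction l with
  | nil => exact List.Pairwise.nil
  | cons p t ih =>
    rcases List.pairwise_cons.mp h1 with ⟨hle, ht⟩
    rw [List.map_cons, List.nodup_cons] at h2
    refine List.pairwise_cons.mpr ⟨fun q hq => lt_of_le_of_ne (hle q hq) ?_, ih ht h2.2⟩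
    intro he
    exact h2.1 (he ▸ List.mem_map.mpr ⟨q, hq, rfl⟩)

theorem pv_union_ofList (s : PySem.Set String) (ys : List String) :
    s.update (PySem.Set.ofList ys) = s.update ys := by
  rw [PySem.Set.update_eq_append_filter, PySem.Set.update_eq_append_filter, PySem.Set.ofList_ofList]

theorem pv_main (before after : List (String × String)) :
    detect_backend_changes before after = detect_backend_changes_alt before after := by
  unfold detect_backend_changes detect_backend_changes_alt
  dsimp only
  set b := PySem.Dict.ofList before with hbdef
  set a := PySem.Dict.ofList after with hadef
  set bk : PySem.Set String := PySem.Set.ofList b.keys with hbk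
  set ak : PySem.Set String := PySem.Set.ofList a.keys with hak
  have hnb : b.keys.Nodup := PySem.Dict.nodup_keys_ofList before
  have hna : a.keys.Nodup := PySem.Dict.nodup_keys_ofList after
  set bi := PySem.List.sorted b.items (fun kv => kv.1) false with hbi
  set ai := PySem.List.sorted a.items (fun kv => kv.1) false with hai
  -- the sorted item lists are strictly key-increasing
  have hpermb : (bi.map Prod.fst).Perm b.keys := (PySem.List.sorted_perm _ _ _).map _
  have hperma : (ai.map Prod.fst).Perm a.keys := (PySem.List.sorted_perm _ _ _).map _
  have hsb : bi.Pairwise (fun p q => p.1 < q.1) :=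
    pv_pairwise_lt_of_le_nodup bi (PySem.List.sorted_pairwise _ _) (hpermb.nodup_iff.mpr hnb)
  have hsa : ai.Pairwise (fun p q => p.1 < q.1) :=
    pv_pairwise_lt_of_le_nodup ai (PySem.List.sorted_pairwise _ _) (hperma.nodup_iff.mpr hna)
  -- membership translations
  have hmb : ∀ x, x ∈ bi.map Prod.fst ↔ x ∈ b.keys := fun x => hpermb.mem_iff
  have hma : ∀ x, x ∈ ai.map Prod.fst ↔ x ∈ a.keys := fun x => hperma.mem_iff
  have hib : ∀ x v, (x, v) ∈ bi ↔ b.get? x = some v := fun x v => by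
    rw [PySem.List.mem_sorted]
    exact (PySem.Dict.get?_eq_some_iff_mem_items b x v hnb).symm
  have hia : ∀ x v, (x, v) ∈ ai ↔ a.get? x = some v := fun x v => by
    rw [PySem.List.mem_sorted]
    exact (PySem.Dict.get?_eq_some_iff_mem_items a x v hna).symm
  -- A's loop is a filter over the sorted union
  set p : String → Prop := fun k =>
    ¬ b.contains k = true ∨ (¬ a.contains k = true ∨ b.getD k "" ≠ a.getD k "") with hp
  have hpd : DecidablePred p := fun k => by rw [hp]; infer_instance
  have hfun : (fun (changed : List String) key =>
      if ¬ (b.contains key = true) then changed ++ [key]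
      else if ¬ (a.contains key = true) then changed ++ [key]
      else if b.getD key "" ≠ a.getD key "" then changed ++ [key]
      else changed)
      = (fun (changed : List String) key => if p key then changed ++ [key] else changed) := by
    funext c k
    by_cases h1 : b.contains k = true <;> by_cases h2 : a.contains k = true <;>
      by_cases h3 : b.getD k "" = a.getD k "" <;> simp [hp, h1, h2, h3]
  rw [hfun, PySem.List.foldl_append_ite_eq_filter p _ [], List.nil_append]
  have hU : PySem.Set.union bk ak = PySem.Set.ofList (b.keys ++ a.keys) := by
    rw [PySem.Set.ofList_append, PySem.Set.union, hak, pv_union_ofList]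
  -- both sides strictly sorted
  have hA : ((PySem.List.sorted (PySem.Set.union bk ak) (fun x => x) false).filter p).Pairwise (· < ·) := by
    refine List.Pairwise.filter _ ?_
    rw [hU]
    exact PySem.List.sorted_ofList_pairwise_lt _
  have hB : (mergeChanges bi ai).Pairwise (· < ·) := pv_merge_pairwise bi ai hsb hsa
  -- same members
  have hmem : ∀ x, x ∈ (PySem.List.sorted (PySem.Set.union bk ak) (fun x => x) false).filter p
      ↔ x ∈ mergeChanges bi ai := by
    intro x
    rw [List.mem_filter, decide_eq_true_eq, PySem.List.mem_sorted, PySem.Set.mem_union,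
      pv_merge_mem bi ai x hsb hsa, hmb, hma]
    have hcb : b.contains x = true ↔ x ∈ b.keys := PySem.Dict.contains_iff_mem_keys b x
    have hca : a.contains x = true ↔ x ∈ a.keys := PySem.Dict.contains_iff_mem_keys a x
    rw [hbk, hak, PySem.Set.mem_ofList, PySem.Set.mem_ofList]
    by_cases hxb : x ∈ b.keys <;> by_cases hxa : x ∈ a.keys
    · -- in both: the filter condition reduces to differing values
      obtain ⟨qb, hqb, hqb1⟩ := List.mem_map.mp (show x ∈ b.items.map (fun q => q.1) from hxb)
      obtain ⟨qa, hqa, hqa1⟩ := List.mem_map.mp (show x ∈ a.items.map (fun q => q.1) from hxa)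
      have hqb' : (x, qb.2) ∈ b.items := by rw [← hqb1]; exact hqb
      have hqa' : (x, qa.2) ∈ a.items := by rw [← hqa1]; exact hqa
      have hgb : b.get? x = some qb.2 :=
        (PySem.Dict.get?_eq_some_iff_mem_items b x qb.2 hnb).mpr hqb'
      have hga : a.get? x = some qa.2 :=
        (PySem.Dict.get?_eq_some_iff_mem_items a x qa.2 hna).mpr hqa'
      have hgbD : b.getD x "" = qb.2 := PySem.Dict.getD_of_mem_items b hqb' hnb ""
      have hgaD : a.getD x "" = qa.2 := PySem.Dict.getD_of_mem_items a hqa' hna ""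
      constructor
      · rintro ⟨-, hpx⟩
        rcases hpx with h | h | h
        · exact absurd (hcb.mpr hxb) h
        · exact absurd (hca.mpr hxa) h
        · refine Or.inr (Or.inr ⟨qb.2, qa.2, (hib _ _).mpr hgb, (hia _ _).mpr hga, ?_⟩)
          rw [← hgbD, ← hgaD]; exact h
      · rintro (⟨-, hno⟩ | ⟨-, hno⟩ | ⟨v, w, h1, h2, h3⟩)
        · exact absurd hxa hno
        · exact absurd hxb hno
        · have hv : v = qb.2 := by
            have := (hib x v).mp h1; rw [hgb] at this; exact (Option.some_inj.mp this).symm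
          have hw : w = qa.2 := by
            have := (hia x w).mp h2; rw [hga] at this; exact (Option.some_inj.mp this).symm
          refine ⟨Or.inl hxb, Or.inr (Or.inr ?_)⟩
          rw [hgbD, hgaD, ← hv, ← hw]; exact h3
    · constructor
      · rintro ⟨-, -⟩; exact Or.inl ⟨hxb, hxa⟩
      · rintro -; exact ⟨Or.inl hxb, Or.inr (Or.inl fun hc => hxa (hca.mp hc))⟩
    · constructor
      · rintro ⟨-, -⟩; exact Or.inr (Or.inl ⟨hxa, hxb⟩)
      · rintro -; exact ⟨Or.inr hxa, Or.inl fun hc => hxb (hcb.mp hc)⟩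
    · constructor
      · rintro ⟨hor, -⟩; rcases hor with h | h
        · exact absurd h hxb
        · exact absurd h hxa
      · rintro (⟨h, -⟩ | ⟨h, -⟩ | ⟨v, w, h1, h2, -⟩)
        · exact absurd h hxb
        · exact absurd h hxa
        · exact absurd (List.mem_map.mpr ⟨(x, v), PySem.Dict.mem_items_of_get?_eq_some b ((hib x v).mp h1), rfl⟩) hxb
  -- two strictly sorted lists with the same members are equal
  have hnA := hA.imp (fun h => ne_of_lt h)
  have hnB := hB.imp (fun h => ne_of_lt h)
  exact List.Perm.eq_of_pairwise (fun u v _ _ h1 h2 => le_antisymm h1 h2)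
    (hA.imp le_of_lt) (hB.imp le_of_lt) ((List.perm_ext_iff_of_nodup hnA hnB).mpr hmem)

-- ===== VERDICT =====
theorem detect_backend_changes_spec : Claim_equal_detect_backend_changes := by
  intro before after _
  exact pv_main before after
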